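-- pv_equiv track=rewrite | github.com/sheelabhadra/LeetCode-Python | 697_Degree_of_an_Array.py | minSubArrayLength
-- ===== SOURCE A (Python) =====
-- def minSubArrayLength(nums, n):
--     start, end = None, None
--     for i in range(len(nums)):
--         if nums[i] == n:
--             start = i
--             break
--
--     for j in range(len(nums)-1, -1, -1):
--         if nums[j] == n:
--             end = j
--             break
--
--     return end-start+1
-- ===== SOURCE B (Python) =====
-- def minSubArrayLength(nums, n):
--     first = None
--     last = None
--     for i, x in enumerate(nums):
--         if x == n:
--             if first is None:
--                 first = i
--             last = i
--     return last - first + 1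
-- ===== Notes on version B (the rewrite author's own statement) =====
-- stated objective: alternative
-- what changed: One forward pass recording first and last match index together, instead of A's two separate scans (forward for the first match, backward for the last).
-- outside the precondition, e.g. on minSubArrayLength([1, 2], 3): A raises TypeError, B raises TypeError
import Mathlib
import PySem

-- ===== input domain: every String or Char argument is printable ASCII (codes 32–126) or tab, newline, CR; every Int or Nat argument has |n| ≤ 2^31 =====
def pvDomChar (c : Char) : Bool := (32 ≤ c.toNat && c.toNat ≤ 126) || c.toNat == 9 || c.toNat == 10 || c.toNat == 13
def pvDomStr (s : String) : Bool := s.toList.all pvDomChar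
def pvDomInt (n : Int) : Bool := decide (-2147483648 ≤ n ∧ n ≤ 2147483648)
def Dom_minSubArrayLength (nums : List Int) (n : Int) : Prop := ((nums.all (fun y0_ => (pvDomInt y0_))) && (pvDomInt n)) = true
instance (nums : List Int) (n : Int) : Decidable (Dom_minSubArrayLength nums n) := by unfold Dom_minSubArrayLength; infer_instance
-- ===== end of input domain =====

-- B does the same job in ONE forward pass (first and last match tracked together)
-- instead of A's forward scan + backward scan; equal return values are proved on
-- Pre_ (n occurs in nums; otherwise the Python A raises TypeError, and B too).

-- ===== PORT A =====
-- first loop of A: scan forward with index i, break at the first element equal to n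
def pvFwdA (l : List Int) (n : Int) (i : Int) : Option Int :=
  match l with
  | [] => none
  | x :: xs => if x == n then some i else pvFwdA xs n (i + 1)

-- second loop of A: j runs len-1, len-2, …, 0, i.e. a forward scan of the REVERSED
-- list with a decreasing index j, break at the first (= last in nums) match
def pvBwdA (l : List Int) (n : Int) (j : Int) : Option Int :=
  match l with
  | [] => none
  | x :: xs => if x == n then some j else pvBwdA xs n (j - 1)

def minSubArrayLength (nums : List Int) (n : Int) : Int :=
  let start := pvFwdA nums n 0
  let stop := pvBwdA nums.reverse n ((nums.length : Int) - 1)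
  -- 'end - start + 1'; when either is None the Python raises TypeError (outside Pre_)
  if stop.isSome && start.isSome then stop.getD 0 - start.getD 0 + 1 else 0

-- ===== PORT B =====
-- single pass: state = (first, last); first set once, last on every match
def pvLoopB (l : List Int) (n : Int) (i : Int) (st : Option Int × Option Int) :
    Option Int × Option Int :=
  match l with
  | [] => st
  | x :: xs =>
      pvLoopB xs n (i + 1)
        (if x == n then ((match st.1 with | some f => some f | none => some i), some i) else st)

def minSubArrayLength_alt (nums : List Int) (n : Int) : Int :=
  let st := pvLoopB nums n 0 (none, none)
  if st.1.isSome && st.2.isSome then st.2.getD 0 - st.1.getD 0 + 1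
  else 0  -- Python raises TypeError here (outside Pre_)

-- ===== PRECONDITION & SPEC =====
-- Pre_ excludes exactly the inputs where n does not occur in nums: there A raises
-- TypeError (None - None + 1), and B raises the same.
def Pre_minSubArrayLength (nums : List Int) (n : Int) : Prop := n ∈ nums
instance (nums : List Int) (n : Int) : Decidable (Pre_minSubArrayLength nums n) := by
  unfold Pre_minSubArrayLength; infer_instance

def pvWitness_minSubArrayLength : List Int × Int := ([1, 2, 2, 3, 2, 1], 2)

def Spec_minSubArrayLength (nums : List Int) (n : Int) (out : Int) : Prop := out = minSubArrayLength_alt nums n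
instance (nums : List Int) (n : Int) (out : Int) : Decidable (Spec_minSubArrayLength nums n out) := by unfold Spec_minSubArrayLength; infer_instance

-- ===== CLAIM (what is proved, stated in full; the proofs are below) =====
def Claim_equal_minSubArrayLength : Prop := ∀ (nums : List Int) (n : Int), Dom_minSubArrayLength nums n → Pre_minSubArrayLength nums n → Spec_minSubArrayLength nums n (minSubArrayLength nums n)

-- ===== LEMMAS AND PROOFS =====

-- last-match helper seen "from the front": L l n i = index of the last element of l
-- equal to n, indices counted from i
def pvLastIdx (l : List Int) (n : Int) (i : Int) : Option Int :=
  pvBwdA l.reverse n (i + (l.length : Int) - 1)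

theorem pvBwdA_append (a b : List Int) (n : Int) (j : Int) :
    pvBwdA (a ++ b) n j =
      match pvBwdA a n j with
      | some e => some e
      | none => pvBwdA b n (j - (a.length : Int)) := by
  induction a generalizing j with
  | nil => simp [pvBwdA]
  | cons x xs ih =>
      simp only [List.cons_append, pvBwdA]
      by_cases h : x == n
      · simp [h]
      · simp only [h, ih]
        have : j - 1 - (xs.length : Int) = j - ((xs.length : Int) + 1) := by ring
        simp [this, List.length_cons]

theorem pvLastIdx_cons (x : Int) (xs : List Int) (n : Int) (i : Int) :
    pvLastIdx (x :: xs) n i =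
      match pvLastIdx xs n (i + 1) with
      | some e => some e
      | none => if x == n then some i else none := by
  unfold pvLastIdx
  rw [List.reverse_cons, pvBwdA_append]
  have h1 : (x :: xs).length = xs.length + 1 := by simp
  have h2 : i + ((x :: xs).length : Int) - 1 = (i + 1) + (xs.length : Int) - 1 := by
    simp [h1]; push_cast; ring
  rw [h2]
  cases pvBwdA xs.reverse n ((i + 1) + (xs.length : Int) - 1) with
  | some e => simp
  | none =>
      have h3 : (i + 1) + (xs.length : Int) - 1 - (xs.length : Int) = i := by ring
      simp [pvBwdA, List.length_reverse, h3]

theorem pvLoopB_fst (l : List Int) (n : Int) (i : Int) (st : Option Int × Option Int) :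
    (pvLoopB l n i st).1 =
      match st.1 with
      | some f => some f
      | none => pvFwdA l n i := by
  induction l generalizing i st with
  | nil => cases h : st.1 <;> simp [pvLoopB, pvFwdA, h]
  | cons x xs ih =>
      simp only [pvLoopB, pvFwdA]
      by_cases h : x == n
      · simp only [h, ih]
        cases hs : st.1 <;> simp
      · simp [h, ih]

theorem pvLoopB_snd (l : List Int) (n : Int) (i : Int) (st : Option Int × Option Int) :
    (pvLoopB l n i st).2 =
      match pvLastIdx l n i with
      | some e => some e
      | none => st.2 := by
  induction l generalizing i st with
  | nil => simp [pvLoopB, pvLastIdx, pvBwdA]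
  | cons x xs ih =>
      rw [pvLastIdx_cons]
      simp only [pvLoopB]
      rw [ih]
      by_cases h : x == n
      · simp only [h]
        cases he : pvLastIdx xs n (i + 1) <;> simp
      · simp only [h]
        cases he : pvLastIdx xs n (i + 1) <;> simp

theorem pvFwdA_isSome (l : List Int) (n : Int) (i : Int) (h : n ∈ l) :
    (pvFwdA l n i).isSome := by
  induction l generalizing i with
  | nil => cases h
  | cons x xs ih =>
      simp only [pvFwdA]
      by_cases hx : x == n
      · simp [hx]
      · have : n ∈ xs := by
          cases List.mem_cons.mp h with
          | inl he => exact absurd (beq_iff_eq.mpr he.symm) hx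
          | inr hm => exact hm
        simp [hx, ih _ this]

theorem pvLastIdx_isSome (l : List Int) (n : Int) (i : Int) (h : n ∈ l) :
    (pvLastIdx l n i).isSome := by
  induction l generalizing i with
  | nil => cases h
  | cons x xs ih =>
      rw [pvLastIdx_cons]
      by_cases hm : n ∈ xs
      · have := ih (i + 1) hm
        cases he : pvLastIdx xs n (i + 1) with
        | none => rw [he] at this; simp at this
        | some e => simp
      · have hx : x = n := by
          cases List.mem_cons.mp h with
          | inl he => exact he.symm
          | inr hm' => exact absurd hm' hm
        cases he : pvLastIdx xs n (i + 1) <;> simp [hx]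

-- ===== VERDICT (by name: the statement is the Claim_ definition above) =====
theorem minSubArrayLength_spec : Claim_equal_minSubArrayLength := by
  intro nums n _ hpre
  unfold Spec_minSubArrayLength minSubArrayLength minSubArrayLength_alt
  have hb : pvBwdA nums.reverse n ((nums.length : Int) - 1) = pvLastIdx nums n 0 := by
    unfold pvLastIdx; ring_nf
  have hf := pvFwdA_isSome nums n 0 hpre
  have hl := pvLastIdx_isSome nums n 0 hpre
  obtain ⟨s, hs⟩ := Option.isSome_iff_exists.mp hf
  obtain ⟨e, he⟩ := Option.isSome_iff_exists.mp hl
  have h1 : (pvLoopB nums n 0 (none, none)).1 = some s := by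
    rw [pvLoopB_fst]; simpa using hs
  have h2 : (pvLoopB nums n 0 (none, none)).2 = some e := by
    rw [pvLoopB_snd]; simp [he]
  simp [hb, he, hs, h1, h2]
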